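-- pv_equiv track=rewrite | github.com/mbsmbs/alphaomok | backend/app/rules.py | is_overline_illegal
-- ===== SOURCE A (Python) =====
-- from typing import List, Tuple
--
-- SIZE = 15
--
-- DIRS: List[Tuple[int, int]] = [(1,0), (0,1), (1,1), (1,-1)]
--
-- def _run_len(board, x, y, dx, dy, p) -> int:
--     """Consecutive stones for player p moving from (x,y) outward (exclusive)."""
--     n = 0
--     xx, yy = x + dx, y + dy
--     while 0 <= xx < SIZE and 0 <= yy < SIZE and board[yy][xx] == p:
--         n += 1
--         xx += dx; yy += dy
--     return n
--
-- def is_overline_illegal(board, x, y, p) -> bool: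
--     """True iff placing p at (x,y) makes >5 in a row in ANY direction."""
--     if board[y][x] != 0:
--         return False
--     for dx, dy in DIRS:
--         total = 1 + _run_len(board, x, y, dx, dy, p) + _run_len(board, x, y, -dx, -dy, p)
--         if total > 5:
--             return True
--     return False
-- ===== SOURCE B (Python) =====
-- from typing import List, Tuple
--
-- SIZE = 15
--
-- DIRS: List[Tuple[int, int]] = [(1, 0), (0, 1), (1, 1), (1, -1)]
--
-- def _cell(board, xx, yy):
--     """Cell value if (xx, yy) is on the board, else None (a blocker)."""
--     if 0 <= xx < SIZE and 0 <= yy < SIZE: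
--         return board[yy][xx]
--     return None
--
-- def is_overline_illegal(board, x, y, p) -> bool:
--     """True iff placing p at (x,y) makes >5 in a row in ANY direction."""
--     if board[y][x] != 0:
--         return False
--     for dx, dy in DIRS:
--         line = [p if k == 0 else _cell(board, x + k * dx, y + k * dy)
--                 for k in range(-5, 6)]
--         if any(all(c == p for c in line[s:s + 6]) for s in range(6)):
--             return True
--     return False
-- ===== Notes on version B (the rewrite author's own statement) =====
-- stated objective: alternative
-- what changed: B replaces A's two outward coordinate-walking while-loops per direction with an explicitly built 11-cell window (off-board cells become a None blocker, centre forced to p) and declares the move illegal iff some 6-cell slice of that window is all p.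
-- outside the precondition, e.g. on is_overline_illegal([[0, 1], [1, 1]], -2, -2, 7): A returns False, B raises IndexError; on is_overline_illegal([[9, 0, 9], [9, 9, 9]], 1, 0, 5): A returns False, B raises IndexError
import Mathlib
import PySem

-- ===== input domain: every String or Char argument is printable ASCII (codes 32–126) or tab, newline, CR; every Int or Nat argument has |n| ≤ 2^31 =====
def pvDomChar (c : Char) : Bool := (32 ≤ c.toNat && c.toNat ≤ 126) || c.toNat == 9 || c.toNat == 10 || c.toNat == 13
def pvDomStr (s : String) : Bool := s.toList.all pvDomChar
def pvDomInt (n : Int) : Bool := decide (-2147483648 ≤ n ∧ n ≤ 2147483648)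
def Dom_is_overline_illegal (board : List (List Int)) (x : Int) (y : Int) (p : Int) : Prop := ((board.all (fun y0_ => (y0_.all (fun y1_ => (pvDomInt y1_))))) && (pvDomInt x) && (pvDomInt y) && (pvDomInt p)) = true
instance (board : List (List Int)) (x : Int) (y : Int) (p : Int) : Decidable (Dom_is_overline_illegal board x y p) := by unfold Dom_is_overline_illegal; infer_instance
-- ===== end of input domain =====

-- ===== PORT A =====
-- B builds an explicit 11-cell window per direction instead of A's two outward while-loops;
-- same return value on Pre_ (alternative decomposition, no speed claim).
-- DIRS is the module constant shared by both Python files.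
def DIRS : List (Int × Int) := [(1, 0), (0, 1), (1, 1), (1, -1)]

-- _run_len's while loop; the Nat argument is a totality fuel (the real loop makes at most 15
-- steps, since the moving coordinate is strictly monotone inside [0,15)), so fuel 32 is exact.
-- Where Python board[yy][xx] would raise, the bind yields none (≠ some p) — outside Pre_.
def runLen (board : List (List Int)) (xx yy dx dy p : Int) : Nat → Int
  | 0 => 0
  | f + 1 =>
    if 0 ≤ xx ∧ xx < 15 ∧ 0 ≤ yy ∧ yy < 15 ∧
        ((PySem.List.pyGet? board yy).bind (fun r => PySem.List.pyGet? r xx)) = some p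
    then 1 + runLen board (xx + dx) (yy + dy) dx dy p f
    else 0

def is_overline_illegal (board : List (List Int)) (x : Int) (y : Int) (p : Int) : Bool :=
  match (PySem.List.pyGet? board y).bind (fun r => PySem.List.pyGet? r x) with
  | none => false      -- Python raises here (IndexError); excluded by Pre_
  | some v =>
    if v ≠ 0 then false
    else DIRS.any (fun d =>
      decide (1 + runLen board (x + d.1) (y + d.2) d.1 d.2 p 32
                + runLen board (x + -d.1) (y + -d.2) (-d.1) (-d.2) p 32 > 5))

-- ===== PORT B =====
-- _cell: value if on the 15x15 board else None; the board lookup's none (short board, raises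
-- in Python) is conflated with the off-board None — such boards are outside Pre_.
def DIRS_B : List (Int × Int) := [(1, 0), (0, 1), (1, 1), (1, -1)]

def cellB (board : List (List Int)) (xx yy : Int) : Option Int :=
  if 0 ≤ xx ∧ xx < 15 ∧ 0 ≤ yy ∧ yy < 15 then
    (PySem.List.pyGet? board yy).bind (fun r => PySem.List.pyGet? r xx)
  else none

def dirLine (board : List (List Int)) (x y p dx dy : Int) : List (Option Int) :=
  (PySem.List.pyRange (-5) 6 1).map (fun k =>
    if k = 0 then some p else cellB board (x + k * dx) (y + k * dy))

def dirB (board : List (List Int)) (x y p dx dy : Int) : Bool :=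
  (PySem.List.pyRange 0 6 1).any (fun s =>
    (PySem.List.slice (dirLine board x y p dx dy) (some s) (some (s + 6))).all
      (fun c => c == some p))

def is_overline_illegal_alt (board : List (List Int)) (x : Int) (y : Int) (p : Int) : Bool :=
  match (PySem.List.pyGet? board y).bind (fun r => PySem.List.pyGet? r x) with
  | none => false      -- Python raises here (IndexError); excluded by Pre_
  | some v =>
    if v ≠ 0 then false
    else DIRS_B.any (fun d => dirB board x y p d.1 d.2)

-- ===== PRECONDITION & SPEC =====
-- Pre_ excludes the inputs where board[y][x] raises, and, when the placed cell is empty,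
-- non-15x15 boards and out-of-range/negative coordinates: there A raises IndexError whenever a
-- scan reaches a missing cell, and its occasional False relies on negative-index wraparound or
-- accidental early boundary stops (B raises IndexError on the cited excluded inputs).
def Pre_is_overline_illegal (board : List (List Int)) (x : Int) (y : Int) (p : Int) : Prop :=
  (((PySem.List.pyGet? board y).bind (fun r => PySem.List.pyGet? r x)).isSome = true) ∧
  ((PySem.List.pyGet? board y).bind (fun r => PySem.List.pyGet? r x) = some 0 →
    board.length = 15 ∧ (∀ r ∈ board, r.length = 15) ∧ 0 ≤ x ∧ x < 15 ∧ 0 ≤ y ∧ y < 15)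
instance (board : List (List Int)) (x : Int) (y : Int) (p : Int) :
    Decidable (Pre_is_overline_illegal board x y p) := by
  unfold Pre_is_overline_illegal; infer_instance

def pvWitness_is_overline_illegal : List (List Int) × Int × Int × Int :=
  (List.replicate 15 (List.replicate 15 0), 7, 7, 1)

def Spec_is_overline_illegal (board : List (List Int)) (x : Int) (y : Int) (p : Int) (out : Bool) : Prop := out = is_overline_illegal_alt board x y p
instance (board : List (List Int)) (x : Int) (y : Int) (p : Int) (out : Bool) : Decidable (Spec_is_overline_illegal board x y p out) := by unfold Spec_is_overline_illegal; infer_instance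

-- ===== CLAIM (what is proved, stated in full; the proofs are below) =====
def Claim_equal_is_overline_illegal : Prop := ∀ (board : List (List Int)) (x : Int) (y : Int) (p : Int), Dom_is_overline_illegal board x y p → Pre_is_overline_illegal board x y p → Spec_is_overline_illegal board x y p (is_overline_illegal board x y p)

-- ===== LEMMAS AND PROOFS =====

theorem runLen_nonneg (board : List (List Int)) (dx dy p : Int) :
    ∀ (f : Nat) (xx yy : Int), 0 ≤ runLen board xx yy dx dy p f := by
  intro f
  induction f with
  | zero => intro xx yy; simp [runLen]
  | succ n ih =>
    intro xx yy
    simp only [runLen]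
    split
    · have := ih (xx + dx) (yy + dy); omega
    · omega

theorem cellB_eq_some (board : List (List Int)) (u v p : Int) :
    cellB board u v = some p ↔
      (0 ≤ u ∧ u < 15 ∧ 0 ≤ v ∧ v < 15 ∧
        ((PySem.List.pyGet? board v).bind (fun r => PySem.List.pyGet? r u)) = some p) := by
  unfold cellB
  split
  · rename_i h; simp only [iff_def]; constructor
    · intro hp; exact ⟨h.1, h.2.1, h.2.2.1, h.2.2.2, hp⟩
    · intro hp; exact hp.2.2.2.2
  · rename_i h; constructor
    · intro hp; simp at hp
    · intro hp; exact absurd ⟨hp.1, hp.2.1, hp.2.2.1, hp.2.2.2.1⟩ h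

theorem runLen_ge_iff (board : List (List Int)) (dx dy p : Int) :
    ∀ (f j : Nat), j ≤ f → ∀ (xx yy : Int),
      ((j : Int) ≤ runLen board xx yy dx dy p f ↔
        ∀ t : Nat, t < j → cellB board (xx + t * dx) (yy + t * dy) = some p) := by
  intro f
  induction f with
  | zero =>
    intro j hj xx yy
    interval_cases j
    simp [runLen]
  | succ n ih =>
    intro j hj xx yy
    cases j with
    | zero =>
      simp only [Nat.cast_zero]
      constructor
      · intro _ t ht; omega
      · intro _; exact runLen_nonneg board dx dy p (n + 1) xx yy
    | succ j' =>
      simp only [runLen]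
      by_cases hc : (0 ≤ xx ∧ xx < 15 ∧ 0 ≤ yy ∧ yy < 15 ∧
          ((PySem.List.pyGet? board yy).bind (fun r => PySem.List.pyGet? r xx)) = some p)
      · rw [if_pos hc]
        have h0 : cellB board xx yy = some p := (cellB_eq_some board xx yy p).mpr hc
        have hih := ih j' (by omega) (xx + dx) (yy + dy)
        constructor
        · intro h t ht
          cases t with
          | zero => simpa using h0
          | succ u =>
            have hj : (j' : Int) ≤ runLen board (xx + dx) (yy + dy) dx dy p n := by
              push_cast at h ⊢; omega
            have hcell := hih.mp hj u (by omega)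
            have e1 : xx + dx + (u : Int) * dx = xx + ((u : Nat) + 1 : Nat) * dx := by
              push_cast; ring
            have e2 : yy + dy + (u : Int) * dy = yy + ((u : Nat) + 1 : Nat) * dy := by
              push_cast; ring
            rw [e1, e2] at hcell
            exact hcell
        · intro h
          have hj : (j' : Int) ≤ runLen board (xx + dx) (yy + dy) dx dy p n := by
            apply hih.mpr
            intro u hu
            have hcell := h (u + 1) (by omega)
            have e1 : xx + ((u : Nat) + 1 : Nat) * dx = xx + dx + (u : Int) * dx := by
              push_cast; ring
            have e2 : yy + ((u : Nat) + 1 : Nat) * dy = yy + dy + (u : Int) * dy := by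
              push_cast; ring
            rw [e1, e2] at hcell
            exact hcell
          push_cast at hj ⊢; omega
      · rw [if_neg hc]
        constructor
        · intro h; push_cast at h; omega
        · intro h
          have hcell := h 0 (by omega)
          simp only [Nat.cast_zero, zero_mul, add_zero] at hcell
          exact absurd ((cellB_eq_some board xx yy p).mp hcell) hc

theorem total_iff (F B : Int) (hF : 0 ≤ F) (hB : 0 ≤ B) :
    1 + F + B > 5 ↔ ∃ i : Nat, i < 6 ∧ (i : Int) ≤ B ∧ ((5 - i : Nat) : Int) ≤ F := by
  constructor
  · intro h
    refine ⟨min B.toNat 5, by omega, by omega, by omega⟩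
  · rintro ⟨i, h1, h2, h3⟩
    omega

theorem exists_lt6 (P : Nat → Prop) :
    (∃ i : Nat, i < 6 ∧ P i) ↔ P 0 ∨ P 1 ∨ P 2 ∨ P 3 ∨ P 4 ∨ P 5 := by
  constructor
  · rintro ⟨i, hi, h⟩; interval_cases i <;> tauto
  · rintro (h | h | h | h | h | h)
    exacts [⟨0, by omega, h⟩, ⟨1, by omega, h⟩, ⟨2, by omega, h⟩,
            ⟨3, by omega, h⟩, ⟨4, by omega, h⟩, ⟨5, by omega, h⟩]

theorem flt0 (Q : Nat → Prop) : (∀ t : Nat, t < 0 → Q t) ↔ True := by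
  simp
theorem flt1 (Q : Nat → Prop) : (∀ t : Nat, t < 1 → Q t) ↔ Q 0 := by
  constructor
  · intro h; exact h 0 (by omega)
  · intro h t ht; interval_cases t; exact h
theorem flt2 (Q : Nat → Prop) : (∀ t : Nat, t < 2 → Q t) ↔ Q 0 ∧ Q 1 := by
  constructor
  · intro h; exact ⟨h 0 (by omega), h 1 (by omega)⟩
  · rintro ⟨h0, h1⟩ t ht; interval_cases t <;> assumption
theorem flt3 (Q : Nat → Prop) : (∀ t : Nat, t < 3 → Q t) ↔ Q 0 ∧ Q 1 ∧ Q 2 := by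
  constructor
  · intro h; exact ⟨h 0 (by omega), h 1 (by omega), h 2 (by omega)⟩
  · rintro ⟨h0, h1, h2⟩ t ht; interval_cases t <;> assumption
theorem flt4 (Q : Nat → Prop) : (∀ t : Nat, t < 4 → Q t) ↔ Q 0 ∧ Q 1 ∧ Q 2 ∧ Q 3 := by
  constructor
  · intro h; exact ⟨h 0 (by omega), h 1 (by omega), h 2 (by omega), h 3 (by omega)⟩
  · rintro ⟨h0, h1, h2, h3⟩ t ht; interval_cases t <;> assumption
theorem flt5 (Q : Nat → Prop) : (∀ t : Nat, t < 5 → Q t) ↔ Q 0 ∧ Q 1 ∧ Q 2 ∧ Q 3 ∧ Q 4 := by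
  constructor
  · intro h; exact ⟨h 0 (by omega), h 1 (by omega), h 2 (by omega), h 3 (by omega), h 4 (by omega)⟩
  · rintro ⟨h0, h1, h2, h3, h4⟩ t ht; interval_cases t <;> assumption

set_option maxHeartbeats 1000000 in
theorem dir_eq (board : List (List Int)) (x y p dx dy : Int) :
    decide (1 + runLen board (x + dx) (y + dy) dx dy p 32
              + runLen board (x + -dx) (y + -dy) (-dx) (-dy) p 32 > 5)
      = dirB board x y p dx dy := by
  have hF := runLen_nonneg board dx dy p 32 (x + dx) (y + dy)
  have hB := runLen_nonneg board (-dx) (-dy) p 32 (x + -dx) (y + -dy)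
  rw [Bool.eq_iff_iff, decide_eq_true_iff]
  rw [total_iff _ _ hF hB]
  simp only [exists_lt6]
  simp only [Nat.reduceSub]
  rw [runLen_ge_iff board (-dx) (-dy) p 32 0 (by omega) (x + -dx) (y + -dy),
      runLen_ge_iff board (-dx) (-dy) p 32 1 (by omega) (x + -dx) (y + -dy),
      runLen_ge_iff board (-dx) (-dy) p 32 2 (by omega) (x + -dx) (y + -dy),
      runLen_ge_iff board (-dx) (-dy) p 32 3 (by omega) (x + -dx) (y + -dy),
      runLen_ge_iff board (-dx) (-dy) p 32 4 (by omega) (x + -dx) (y + -dy),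
      runLen_ge_iff board (-dx) (-dy) p 32 5 (by omega) (x + -dx) (y + -dy),
      runLen_ge_iff board dx dy p 32 5 (by omega) (x + dx) (y + dy),
      runLen_ge_iff board dx dy p 32 4 (by omega) (x + dx) (y + dy),
      runLen_ge_iff board dx dy p 32 3 (by omega) (x + dx) (y + dy),
      runLen_ge_iff board dx dy p 32 2 (by omega) (x + dx) (y + dy),
      runLen_ge_iff board dx dy p 32 1 (by omega) (x + dx) (y + dy),
      runLen_ge_iff board dx dy p 32 0 (by omega) (x + dx) (y + dy)]
  simp only [flt0, flt1, flt2, flt3, flt4, flt5, true_and, and_true]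
  unfold dirB dirLine
  rw [show PySem.List.pyRange (-5) 6 1 = [-5, -4, -3, -2, -1, 0, 1, 2, 3, 4, 5] from by decide,
      show PySem.List.pyRange 0 6 1 = [0, 1, 2, 3, 4, 5] from by decide]
  norm_num [pysem, beq_iff_eq]
  simp
  ring_nf
  generalize (cellB board (x - dx * 5) (y - dy * 5) = some p) = a5
  generalize (cellB board (x - dx * 4) (y - dy * 4) = some p) = a4
  generalize (cellB board (x - dx * 3) (y - dy * 3) = some p) = a3
  generalize (cellB board (x - dx * 2) (y - dy * 2) = some p) = a2
  generalize (cellB board (x - dx) (y - dy) = some p) = a1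
  generalize (cellB board (x + dx) (y + dy) = some p) = b1
  generalize (cellB board (x + dx * 2) (y + dy * 2) = some p) = b2
  generalize (cellB board (x + dx * 3) (y + dy * 3) = some p) = b3
  generalize (cellB board (x + dx * 4) (y + dy * 4) = some p) = b4
  generalize (cellB board (x + dx * 5) (y + dy * 5) = some p) = b5
  tauto

-- ===== VERDICT (by name: the statement is the Claim_ definition above) =====
theorem is_overline_illegal_spec : Claim_equal_is_overline_illegal := by
  intro board x y p _hDom _hPre
  unfold Spec_is_overline_illegal is_overline_illegal is_overline_illegal_alt
  cases h : (PySem.List.pyGet? board y).bind (fun r => PySem.List.pyGet? r x) with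
  | none => rfl
  | some v =>
    by_cases hv : v ≠ 0
    · simp [hv]
    · simp only [ne_eq, not_not] at hv
      subst hv
      norm_num
      rw [show DIRS_B = DIRS from rfl]
      refine PySem.List.any_congr_mem ?_
      intro d _
      exact dir_eq board x y p d.1 d.2
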